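-- pv_equiv track=rewrite | github.com/yanlinsiu/FAERS_program_for_Zolpidem | faers_project/structure_scan.py | infer_dataset_family
-- ===== SOURCE A (Python) =====
-- KNOWN_DATASETS = ("DEMO", "DRUG", "INDI", "OUTC", "REAC", "RPSR", "THER", "STAT", "SIZE")
--
-- def infer_dataset_family(file_name: str) -> str:
--     upper_name = file_name.upper()
--     for dataset in KNOWN_DATASETS:
--         if upper_name.startswith(dataset):
--             return dataset
--     if "DELETE" in upper_name or "DELETED" in upper_name:
--         return "DELETE"
--     return "OTHER"
-- ===== SOURCE B (Python) =====
-- KNOWN_DATASETS = ("DEMO", "DRUG", "INDI", "OUTC", "REAC", "RPSR", "THER", "STAT", "SIZE")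
-- KNOWN_SET = frozenset(KNOWN_DATASETS)
--
-- def infer_dataset_family(file_name: str) -> str:
--     upper_name = file_name.upper()
--     prefix = upper_name[:4]
--     if prefix in KNOWN_SET:
--         return prefix
--     if "DELETE" in upper_name:
--         return "DELETE"
--     return "OTHER"
-- ===== Notes on version B (the rewrite author's own statement) =====
-- stated objective: idiomatic
-- what changed: Replaces the startswith loop over the nine codes by a single 4-character slice and one frozenset lookup (all codes have length 4), and drops the second, redundant substring test of the fallback branch (its needle extends the first needle, so the first test alone decides the branch).
import Mathlib
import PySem

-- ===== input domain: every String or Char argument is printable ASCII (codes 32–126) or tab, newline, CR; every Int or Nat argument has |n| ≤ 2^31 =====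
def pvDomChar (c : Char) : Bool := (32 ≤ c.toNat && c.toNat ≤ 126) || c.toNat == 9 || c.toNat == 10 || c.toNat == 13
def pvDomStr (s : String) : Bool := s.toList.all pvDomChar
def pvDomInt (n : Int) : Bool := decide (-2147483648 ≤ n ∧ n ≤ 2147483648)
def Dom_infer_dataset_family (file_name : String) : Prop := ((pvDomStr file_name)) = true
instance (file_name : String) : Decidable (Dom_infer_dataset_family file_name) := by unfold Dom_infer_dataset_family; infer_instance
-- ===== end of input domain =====

-- B replaces A's startswith loop over the nine codes by one 4-char slice plus a set lookup
-- and drops the redundant "DELETED" substring test (objective: idiomatic).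

-- ===== PORT A =====
def pvKNOWN_DATASETS : List String :=
  ["DEMO", "DRUG", "INDI", "OUTC", "REAC", "RPSR", "THER", "STAT", "SIZE"]

-- 'for dataset in KNOWN_DATASETS: if upper_name.startswith(dataset): return dataset',
-- falling through to the DELETE/OTHER tail
def pvLoopA (upper_name : String) : List String → String
  | [] =>
      if PySem.Str.isIn "DELETE" upper_name || PySem.Str.isIn "DELETED" upper_name then "DELETE"
      else "OTHER"
  | d :: rest =>
      if PySem.Str.startswith upper_name d then d else pvLoopA upper_name rest

def infer_dataset_family (file_name : String) : String :=
  pvLoopA (PySem.Str.upper file_name) pvKNOWN_DATASETS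

-- ===== PORT B =====
def pvKNOWN_SET : PySem.Set String := PySem.Set.ofList pvKNOWN_DATASETS

def infer_dataset_family_alt (file_name : String) : String :=
  let upper_name := PySem.Str.upper file_name
  let pre4 := PySem.Str.slice upper_name none (some 4)
  if PySem.Set.contains pvKNOWN_SET pre4 then pre4
  else if PySem.Str.isIn "DELETE" upper_name then "DELETE"
  else "OTHER"

-- ===== PRECONDITION & SPEC =====
def Spec_infer_dataset_family (file_name : String) (out : String) : Prop := out = infer_dataset_family_alt file_name
instance (file_name : String) (out : String) : Decidable (Spec_infer_dataset_family file_name out) := by unfold Spec_infer_dataset_family; infer_instance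

-- ===== CLAIM (what is proved, stated in full; the proofs are below) =====
def Claim_equal_infer_dataset_family : Prop := ∀ (file_name : String), Dom_infer_dataset_family file_name → Spec_infer_dataset_family file_name (infer_dataset_family file_name)

-- ===== LEMMAS AND PROOFS =====

-- startswith by a 4-char code is equality of the 4-char slice with the code
theorem pv_startswith_eq_slice (s d : String) (h : d.toList.length = 4) :
    PySem.Str.startswith s d = decide (PySem.Str.slice s none (some 4) = d) := by
  have h4 : PySem.List.slice s.toList none (some (4:Int)) = s.toList.take 4 := by
    simpa using PySem.List.slice_to (b := (4:Int)) (xs := s.toList) (by norm_num)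
  have hsl : (PySem.Str.slice s none (some 4) = d) ↔ s.toList.take 4 = d.toList := by
    constructor
    · intro he
      have := congrArg String.toList he
      simpa [h4] using this
    · intro he
      apply String.ext
      have : (PySem.Str.slice s none (some 4)).toList = d.toList := by simpa [h4] using he
      simpa [String.toList] using this
  by_cases hp : d.toList <+: s.toList
  · have : s.toList.take 4 = d.toList := by
      have := List.prefix_iff_eq_take.mp hp
      rw [h] at this; exact this.symm
    simp [hsl, this]
    exact (PySem.Chars.startswith_iff _ _).mpr hp
  · have : ¬ s.toList.take 4 = d.toList := by
      intro he
      exact hp (by rw [← he, ← h]; exact List.take_prefix _ _)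
    simp [hsl, this]
    rw [← Bool.not_eq_true, PySem.Chars.startswith_iff]
    exact hp

-- "DELETED" in s implies "DELETE" in s
theorem pv_deleted_imp_delete (s : String) :
    PySem.Str.isIn "DELETED" s = true → PySem.Str.isIn "DELETE" s = true := by
  intro h
  rw [PySem.Str.isIn_iff_infix] at h ⊢
  exact List.IsInfix.trans (by decide) h

set_option maxHeartbeats 2000000 in
-- A and B agree on every string (no Dom hypothesis needed)
theorem pv_main (s : String) : infer_dataset_family s = infer_dataset_family_alt s := by
  unfold infer_dataset_family infer_dataset_family_alt pvKNOWN_DATASETS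
  have hset : pvKNOWN_SET = ["DEMO", "DRUG", "INDI", "OUTC", "REAC", "RPSR", "THER", "STAT", "SIZE"] := by
    decide
  simp only [pvLoopA, hset,
    pv_startswith_eq_slice _ "DEMO" (by decide), pv_startswith_eq_slice _ "DRUG" (by decide),
    pv_startswith_eq_slice _ "INDI" (by decide), pv_startswith_eq_slice _ "OUTC" (by decide),
    pv_startswith_eq_slice _ "REAC" (by decide), pv_startswith_eq_slice _ "RPSR" (by decide),
    pv_startswith_eq_slice _ "THER" (by decide), pv_startswith_eq_slice _ "STAT" (by decide),
    pv_startswith_eq_slice _ "SIZE" (by decide)]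
  generalize PySem.Str.upper s = u
  have himp := pv_deleted_imp_delete u
  have hc : ∀ p : String,
      PySem.Set.contains ["DEMO", "DRUG", "INDI", "OUTC", "REAC", "RPSR", "THER", "STAT", "SIZE"] p
      = (decide (p = "DEMO") || decide (p = "DRUG") || decide (p = "INDI") || decide (p = "OUTC")
         || decide (p = "REAC") || decide (p = "RPSR") || decide (p = "THER") || decide (p = "STAT")
         || decide (p = "SIZE")) := by
    intro p
    rw [Bool.eq_iff_iff]
    simp
    tauto
  rw [hc]
  generalize PySem.Str.slice u none (some 4) = p
  generalize hd1 : PySem.Str.isIn "DELETE" u = b1 at himp ⊢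
  generalize hd2 : PySem.Str.isIn "DELETED" u = b2 at himp ⊢
  have hor : (b1 || b2) = b1 := by
    cases b2
    · simp
    · simp [himp rfl]
  rw [hor]
  split_ifs with h1 h2 h3 h4 h5 h6 h7 h8 h9 <;> simp_all

-- ===== VERDICT (by name: the statement is the Claim_ definition above) =====
theorem infer_dataset_family_spec : Claim_equal_infer_dataset_family := by
  intro s _
  unfold Spec_infer_dataset_family
  exact pv_main s
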